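-- pv_equiv track=rewrite | github.com/SuperBox64/JibberJabber | jibjab/jjpy/jj/reverse_transpiler.py | _replace_outside_strings
-- ===== SOURCE A (Python) =====
-- def _replace_outside_strings(text, find, replace):
--     result = []
--     in_string = False
--     i = 0
--     while i < len(text):
--         if text[i] == '"':
--             in_string = not in_string
--             result.append(text[i])
--             i += 1
--             continue
--         if in_string:
--             result.append(text[i])
--             i += 1
--             continue
--         if text[i:i+len(find)] == find:
--             result.append(replace)
--             i += len(find)
--         else:
--             result.append(text[i])
--             i += 1
--     return ''.join(result)
-- ===== SOURCE B (Python) =====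
-- def _replace_outside_strings(text, find, replace):
--     out = []
--     i = 0
--     n = len(text)
--     in_string = False
--     while i < n:
--         q = text.find('"', i)
--         if in_string:
--             if q == -1:
--                 out.append(text[i:])
--                 break
--             out.append(text[i:q + 1])
--             i = q + 1
--             in_string = False
--         else:
--             f = text.find(find, i)
--             if f != -1 and (q == -1 or f < q):
--                 out.append(text[i:f])
--                 out.append(replace)
--                 i = f + len(find)
--             elif q != -1:
--                 out.append(text[i:q + 1])
--                 i = q + 1
--                 in_string = True
--             else:
--                 out.append(text[i:])
--                 break
--     return ''.join(out)
-- ===== Notes on version B (the rewrite author's own statement) =====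
-- stated objective: faster
-- what changed: A scans one character at a time, comparing a fresh slice text[i:i+len(find)] against find at every out-of-string index (O(n*m)); B uses str.find to jump straight from one event (next quote or next match) to the next and copies whole chunks, so the per-index slice comparison disappears.
-- outside the precondition, e.g. on _replace_outside_strings('"a"', '', 'x'): A returns '"a"', B returns '"a"'
import Mathlib
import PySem

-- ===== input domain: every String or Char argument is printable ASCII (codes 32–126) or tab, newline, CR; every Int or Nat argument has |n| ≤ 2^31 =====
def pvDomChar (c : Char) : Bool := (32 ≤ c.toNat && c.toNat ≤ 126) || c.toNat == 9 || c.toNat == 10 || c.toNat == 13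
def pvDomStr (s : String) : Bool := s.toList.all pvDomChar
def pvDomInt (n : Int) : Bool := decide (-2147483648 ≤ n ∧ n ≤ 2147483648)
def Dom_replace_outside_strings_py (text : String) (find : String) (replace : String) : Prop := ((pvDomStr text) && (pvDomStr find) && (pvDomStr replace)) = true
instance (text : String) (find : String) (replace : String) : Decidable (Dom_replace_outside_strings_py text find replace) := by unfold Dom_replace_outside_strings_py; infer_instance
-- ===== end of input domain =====

-- B replaces A's one-character-at-a-time scan (a slice comparison at every index) by str.find
-- jumps from one event (quote or match) to the next, copying whole chunks: same return value,
-- measurably faster. (A never mutates its arguments; equivalence is about the return value.)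

-- ===== PORT A =====
-- fuel = |text| + 1 suffices whenever find ≠ "" (each iteration advances i); for find = ""
-- the Python loops forever (excluded by Pre_ below) and the port merely stops.
def pvLoopA (text find repl : List Char) : Nat → Nat → Bool → List (List Char) → List (List Char)
  | 0, _, _, result => result
  | fuel+1, i, inStr, result =>
    if h : i < text.length then
      if text[i] = '"' then
        pvLoopA text find repl fuel (i+1) (!inStr) (result ++ [[text[i]]])
      else if inStr then
        pvLoopA text find repl fuel (i+1) inStr (result ++ [[text[i]]])
      else if PySem.List.slice text (some ((i : Int))) (some (((i + find.length : Nat)) : Int)) = find then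
        pvLoopA text find repl fuel (i + find.length) inStr (result ++ [repl])
      else
        pvLoopA text find repl fuel (i+1) inStr (result ++ [[text[i]]])
    else result

def replace_outside_strings_py (text : String) (find : String) (replace : String) : String :=
  String.mk (PySem.Chars.join []
    (pvLoopA text.toList find.toList replace.toList (text.toList.length + 1) 0 false []))

-- ===== PORT B =====
def pvLoopB (text find repl : List Char) : Nat → Nat → Bool → List (List Char) → List (List Char)
  | 0, _, _, out => out
  | fuel+1, i, inStr, out =>
    if i < text.length then
      if inStr then
        if PySem.Chars.findFrom text ['"'] (i : Int) = -1 then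
          out ++ [PySem.List.slice text (some ((i : Int))) none]
        else
          pvLoopB text find repl fuel ((PySem.Chars.findFrom text ['"'] (i : Int)).toNat + 1) false
            (out ++ [PySem.List.slice text (some ((i : Int))) (some (PySem.Chars.findFrom text ['"'] (i : Int) + 1))])
      else
        if PySem.Chars.findFrom text find (i : Int) ≠ -1 ∧
            (PySem.Chars.findFrom text ['"'] (i : Int) = -1 ∨
             PySem.Chars.findFrom text find (i : Int) < PySem.Chars.findFrom text ['"'] (i : Int)) then
          pvLoopB text find repl fuel ((PySem.Chars.findFrom text find (i : Int)).toNat + find.length) inStr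
            (out ++ [PySem.List.slice text (some ((i : Int))) (some (PySem.Chars.findFrom text find (i : Int))), repl])
        else if PySem.Chars.findFrom text ['"'] (i : Int) ≠ -1 then
          pvLoopB text find repl fuel ((PySem.Chars.findFrom text ['"'] (i : Int)).toNat + 1) true
            (out ++ [PySem.List.slice text (some ((i : Int))) (some (PySem.Chars.findFrom text ['"'] (i : Int) + 1))])
        else
          out ++ [PySem.List.slice text (some ((i : Int))) none]
    else out

def replace_outside_strings_py_alt (text : String) (find : String) (replace : String) : String :=
  String.mk (PySem.Chars.join []
    (pvLoopB text.toList find.toList replace.toList (text.toList.length + 1) 0 false []))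

-- ===== PRECONDITION & SPEC =====
-- Pre_ excludes find = "", on which the Python A (and B alike) loops forever as soon as any
-- character lies outside the quoted regions; on the degenerate fully-quoted texts where A does
-- still return, B returns the same value.
def Pre_replace_outside_strings_py (text : String) (find : String) (replace : String) : Prop :=
  find ≠ ""
instance (text : String) (find : String) (replace : String) : Decidable (Pre_replace_outside_strings_py text find replace) := by unfold Pre_replace_outside_strings_py; infer_instance

def pvWitness_replace_outside_strings_py : String × String × String := ("ab \"ab\" ab", "ab", "xyz")

def Spec_replace_outside_strings_py (text : String) (find : String) (replace : String) (out : String) : Prop := out = replace_outside_strings_py_alt text find replace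
instance (text : String) (find : String) (replace : String) (out : String) : Decidable (Spec_replace_outside_strings_py text find replace out) := by unfold Spec_replace_outside_strings_py; infer_instance

-- ===== CLAIM (what is proved, stated in full; the proofs are below) =====
def Claim_equal_replace_outside_strings_py : Prop := ∀ (text : String) (find : String) (replace : String), Dom_replace_outside_strings_py text find replace → Pre_replace_outside_strings_py text find replace → Spec_replace_outside_strings_py text find replace (replace_outside_strings_py text find replace)

-- ===== LEMMAS AND PROOFS =====

lemma pvJoin_flatten : ∀ (l : List (List Char)), PySem.Chars.join [] l = l.flatten
  | [] => by simp [PySem.Chars.join_nil]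
  | [x] => by simp [PySem.Chars.join_singleton]
  | a :: b :: t => by
      rw [PySem.Chars.join_cons_cons, pvJoin_flatten (b :: t)]; simp

lemma pvSingletonPrefix (t : List Char) (k : Nat) (c : Char) :
    ([c] <+: t.drop k) ↔ t[k]? = some c := by
  rw [← List.head?_drop]
  cases t.drop k <;> simp [List.cons_prefix_iff]

lemma pvNoOcc (t sub : List Char) (i k : Nat) (hik : i ≤ k)
    (h : ¬ sub <:+: t.drop i) : ¬ sub <+: t.drop k := by
  intro hp
  apply h
  have hd : t.drop k = (t.drop i).drop (k - i) := by
    rw [List.drop_drop]; congr 1; omega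
  rw [hd] at hp
  exact hp.isInfix.trans (List.drop_suffix _ _).isInfix

lemma pvLoopA_stop (t f rp : List Char) (i : Nat) (b : Bool) (r : List (List Char))
    (h : ¬ i < t.length) : ∀ fuel, pvLoopA t f rp fuel i b r = r := by
  intro fuel; cases fuel <;> simp [pvLoopA, h]

lemma pvLoopB_stop (t f rp : List Char) (i : Nat) (b : Bool) (r : List (List Char))
    (h : ¬ i < t.length) : ∀ fuel, pvLoopB t f rp fuel i b r = r := by
  intro fuel; cases fuel <;> simp [pvLoopB, h]

lemma pvLoopA_acc (t f rp : List Char) :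
    ∀ fuel i b r, pvLoopA t f rp fuel i b r = r ++ pvLoopA t f rp fuel i b [] := by
  intro fuel
  induction fuel with
  | zero => intro i b r; simp [pvLoopA]
  | succ n ih =>
    intro i b r
    by_cases h : i < t.length
    · simp only [pvLoopA, dif_pos h]
      split_ifs <;> rw [ih, ih _ _ ([] ++ _)] <;> simp
    · rw [pvLoopA_stop _ _ _ _ _ _ h, pvLoopA_stop _ _ _ _ _ _ h]; simp

lemma pvLoopB_acc (t f rp : List Char) :
    ∀ fuel i b r, pvLoopB t f rp fuel i b r = r ++ pvLoopB t f rp fuel i b [] := by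
  intro fuel
  induction fuel with
  | zero => intro i b r; simp [pvLoopB]
  | succ n ih =>
    intro i b r
    by_cases h : i < t.length
    · simp only [pvLoopB, if_pos h]
      split_ifs <;> try (rw [ih, ih _ _ ([] ++ _)]; simp)
      all_goals simp
    · rw [pvLoopB_stop _ _ _ _ _ _ h, pvLoopB_stop _ _ _ _ _ _ h]; simp

lemma pvLoopA_fuel (t f rp : List Char) (hf : f ≠ []) :
    ∀ fuel fuel' i b r, t.length - i ≤ fuel → t.length - i ≤ fuel' →
      pvLoopA t f rp fuel i b r = pvLoopA t f rp fuel' i b r := by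
  have hfl : 0 < f.length := List.length_pos_iff.mpr hf
  intro fuel
  induction fuel with
  | zero =>
    intro fuel' i b r h1 h2
    have : ¬ i < t.length := by omega
    rw [pvLoopA_stop _ _ _ _ _ _ this, pvLoopA_stop _ _ _ _ _ _ this]
  | succ n ih =>
    intro fuel' i b r h1 h2
    by_cases hi : i < t.length
    · obtain ⟨m, rfl⟩ : ∃ m, fuel' = m + 1 := by
        cases fuel' with
        | zero => omega
        | succ m => exact ⟨m, rfl⟩
      simp only [pvLoopA, dif_pos hi]
      split_ifs <;> apply ih <;> omega
    · rw [pvLoopA_stop _ _ _ _ _ _ hi, pvLoopA_stop _ _ _ _ _ _ hi]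

-- one A-iteration at a quote toggles and emits the quote
lemma pvA_step_quote (t f rp : List Char) (i : Nat) (hi : i < t.length)
    (hc : t[i] = '"') (b : Bool) (hf : f ≠ []) :
    ∀ fuel fuel', t.length - i ≤ fuel → t.length - (i+1) ≤ fuel' →
      (pvLoopA t f rp fuel i b []).flatten = '"' :: (pvLoopA t f rp fuel' (i+1) (!b) []).flatten := by
  intro fuel fuel' h1 h2
  obtain ⟨m, rfl⟩ : ∃ m, fuel = m + 1 := by
    cases fuel with
    | zero => omega
    | succ m => exact ⟨m, rfl⟩
  simp only [pvLoopA, dif_pos hi, if_pos hc]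
  rw [pvLoopA_acc, pvLoopA_fuel t f rp hf m fuel' (i+1) (!b) [] (by omega) h2]
  simp [hc]

-- one A-iteration at an out-of-string match emits the replacement
lemma pvA_step_match (t f rp : List Char) (hf : f ≠ []) (i : Nat) (hi : i < t.length)
    (hc : ¬ t[i] = '"') (hm : f <+: t.drop i) :
    ∀ fuel fuel', t.length - i ≤ fuel → t.length - (i + f.length) ≤ fuel' →
      (pvLoopA t f rp fuel i false []).flatten = rp ++ (pvLoopA t f rp fuel' (i + f.length) false []).flatten := by
  intro fuel fuel' h1 h2
  obtain ⟨m, rfl⟩ : ∃ m, fuel = m + 1 := by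
    cases fuel with
    | zero => omega
    | succ m => exact ⟨m, rfl⟩
  have hsl : PySem.List.slice t (some ((i : Int))) (some (((i + f.length : Nat)) : Int)) = f := by
    rw [PySem.List.slice_natCast]
    have heq : i + f.length - i = f.length := by omega
    rw [heq]
    exact (List.prefix_iff_eq_take.mp hm).symm
  have hfl : 0 < f.length := List.length_pos_iff.mpr hf
  simp only [pvLoopA, dif_pos hi, if_neg hc, Bool.false_eq_true, if_false, if_pos hsl]
  rw [pvLoopA_acc, pvLoopA_fuel t f rp hf m fuel' (i + f.length) false [] (by omega) h2]
  simp

-- facts delivered by a successful findFrom: position, bounds, occurrence, minimality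
lemma pvFindFacts (t sub : List Char) (hsub : sub ≠ []) (i : Nat) (hil : i ≤ t.length)
    (hne : PySem.Chars.findFrom t sub (i : Int) ≠ -1) :
    i ≤ (PySem.Chars.findFrom t sub (i : Int)).toNat ∧
    (PySem.Chars.findFrom t sub (i : Int)).toNat < t.length ∧
    ((PySem.Chars.findFrom t sub (i : Int)).toNat : Int) = PySem.Chars.findFrom t sub (i : Int) ∧
    sub <+: t.drop (PySem.Chars.findFrom t sub (i : Int)).toNat ∧
    ∀ k, i ≤ k → k < (PySem.Chars.findFrom t sub (i : Int)).toNat → ¬ sub <+: t.drop k := by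
  obtain ⟨hge, hpre, hmin⟩ := PySem.Chars.findFrom_natCast_spec t sub i hil hne
  have h0 : (0:Int) ≤ PySem.Chars.findFrom t sub ↑i :=
    le_trans (by exact_mod_cast Int.ofNat_nonneg i) hge
  refine ⟨by omega, ?_, by omega, hpre, hmin⟩
  have hlen := hpre.length_le
  have hsl : 0 < sub.length := List.length_pos_iff.mpr hsub
  rw [List.length_drop] at hlen
  omega

lemma pvNoOccAll (t sub : List Char) (i : Nat) (hil : i ≤ t.length)
    (heq : PySem.Chars.findFrom t sub (i : Int) = -1) :
    ∀ k, i ≤ k → ¬ sub <+: t.drop k := by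
  have h := (PySem.Chars.findFrom_natCast_eq_neg_one_iff t sub i hil).mp heq
  intro k hk
  exact pvNoOcc t sub i k hk h

lemma pvNotQuote (t : List Char) (k : Nat) (hk : k < t.length)
    (h : ¬ ['"'] <+: t.drop k) : ¬ t[k] = '"' := by
  intro he
  exact h ((pvSingletonPrefix t k '"').mpr (by rw [List.getElem?_eq_getElem hk, he]))

-- A scans a region with no quote and (when out of string) no match char by char
lemma pvA_scan (t f rp : List Char) (hf : f ≠ []) :
    ∀ d i j b fuelA fuelB, i + d = j → j ≤ t.length →
      (∀ k, i ≤ k → k < j → ¬ t[k]? = some '"' ∧ (b = false → ¬ f <+: t.drop k)) →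
      t.length - i ≤ fuelA → t.length - j ≤ fuelB →
      (pvLoopA t f rp fuelA i b []).flatten =
        (t.drop i).take (j - i) ++ (pvLoopA t f rp fuelB j b []).flatten := by
  intro d
  induction d with
  | zero =>
    intro i j b fuelA fuelB hij hj hcond h1 h2
    have hji : j = i := by omega
    subst hji
    rw [pvLoopA_fuel t f rp hf fuelA fuelB j b [] h1 h2]
    simp
  | succ d ih =>
    intro i j b fuelA fuelB hij hj hcond h1 h2
    have hi : i < t.length := by omega
    obtain ⟨m, rfl⟩ : ∃ m, fuelA = m + 1 := by
      cases fuelA with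
      | zero => omega
      | succ m => exact ⟨m, rfl⟩
    have hci := hcond i (le_refl i) (by omega)
    have hcq : ¬ t[i] = '"' := by
      intro h
      exact hci.1 (by rw [List.getElem?_eq_getElem hi, h])
    have hstep : (pvLoopA t f rp (m+1) i b []).flatten
        = t[i] :: (pvLoopA t f rp m (i+1) b []).flatten := by
      cases b with
      | true =>
        simp only [pvLoopA, dif_pos hi, if_neg hcq]
        rw [if_pos trivial, pvLoopA_acc]
        simp
      | false =>
        have hns : ¬ PySem.List.slice t (some ((i : Int))) (some (((i + f.length : Nat)) : Int)) = f := by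
          rw [PySem.List.slice_natCast]
          have heq : i + f.length - i = f.length := by omega
          rw [heq]
          intro h
          exact (hci.2 rfl) (List.prefix_iff_eq_take.mpr h.symm)
        simp only [pvLoopA, dif_pos hi, if_neg hcq, Bool.false_eq_true, if_false, if_neg hns]
        rw [pvLoopA_acc]
        simp
    rw [hstep, ih (i+1) j b m fuelB (by omega) hj
      (fun k hk1 hk2 => hcond k (by omega) hk2) (by omega) h2]
    rw [List.drop_eq_getElem_cons hi]
    have hji : j - i = (j - (i+1)) + 1 := by omega
    rw [hji, List.take_succ_cons]
    simp

lemma pvTakeSplit (t : List Char) (i qn : Nat) (hiq : i ≤ qn) (hq : qn < t.length) :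
    (t.drop i).take (qn + 1 - i) = (t.drop i).take (qn - i) ++ [t[qn]] := by
  have h1 : qn + 1 - i = (qn - i) + 1 := by omega
  rw [h1, List.take_add_one]
  congr 1
  rw [List.getElem?_drop]
  have h2 : i + (qn - i) = qn := by omega
  rw [h2, List.getElem?_eq_getElem hq]
  rfl

lemma pvMain (t f rp : List Char) (hf : f ≠ []) :
    ∀ d i b fuelA fuelB, t.length - i ≤ d →
      t.length - i ≤ fuelA → t.length - i ≤ fuelB →
      (pvLoopA t f rp fuelA i b []).flatten = (pvLoopB t f rp fuelB i b []).flatten := by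
  have hfl : 0 < f.length := List.length_pos_iff.mpr hf
  intro d
  induction d with
  | zero =>
    intro i b fuelA fuelB hd h1 h2
    have hi : ¬ i < t.length := by omega
    rw [pvLoopA_stop _ _ _ _ _ _ hi _, pvLoopB_stop _ _ _ _ _ _ hi _]
  | succ d ih =>
    intro i b fuelA fuelB hd h1 h2
    by_cases hi : i < t.length
    case neg => rw [pvLoopA_stop _ _ _ _ _ _ hi _, pvLoopB_stop _ _ _ _ _ _ hi _]
    have hil : i ≤ t.length := le_of_lt hi
    obtain ⟨mB, rfl⟩ : ∃ m, fuelB = m + 1 := by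
      cases fuelB with
      | zero => omega
      | succ m => exact ⟨m, rfl⟩
    -- tail: no quote ahead and (out of string) no match ahead: A copies the rest of the text
    have tail : ∀ b', (∀ k, i ≤ k → k < t.length →
          ¬ t[k]? = some '"' ∧ (b' = false → ¬ f <+: t.drop k)) →
        (pvLoopA t f rp fuelA i b' []).flatten
          = ([] ++ [PySem.List.slice t (some ((i : Int))) none]).flatten := by
      intro b' hcond
      rw [pvA_scan t f rp hf (t.length - i) i t.length b' fuelA 0 (by omega) (le_refl _) hcond h1 (by omega)]
      rw [pvLoopA_stop _ _ _ _ _ _ (by omega) 0]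
      rw [PySem.List.slice_from t (by exact_mod_cast Int.natCast_nonneg i)]
      have htk : (t.drop i).take (t.length - i) = t.drop i :=
        List.take_of_length_le (by rw [List.length_drop])
      simp [htk]
    -- quote: the next event ahead is a quote at Q: A scans to it, toggles, and both recurse
    have quote : ∀ b', ∀ hq : PySem.Chars.findFrom t ['"'] (i : Int) ≠ -1,
        (∀ k, i ≤ k → k < (PySem.Chars.findFrom t ['"'] (i : Int)).toNat →
          ¬ t[k]? = some '"' ∧ (b' = false → ¬ f <+: t.drop k)) →
        (pvLoopA t f rp fuelA i b' []).flatten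
          = PySem.List.slice t (some ((i : Int))) (some (PySem.Chars.findFrom t ['"'] (i : Int) + 1))
            ++ (pvLoopB t f rp mB ((PySem.Chars.findFrom t ['"'] (i : Int)).toNat + 1) (!b') []).flatten := by
      intro b' hq hcond
      obtain ⟨hiq, hqlt, hqcast, hqpre, hqmin⟩ := pvFindFacts t ['"'] (by simp) i hil hq
      have hquote : t[(PySem.Chars.findFrom t ['"'] (i : Int)).toNat] = '"' := by
        have hs := (pvSingletonPrefix t _ '"').mp hqpre
        rw [List.getElem?_eq_getElem hqlt] at hs
        exact Option.some.inj hs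
      rw [pvA_scan t f rp hf ((PySem.Chars.findFrom t ['"'] (i : Int)).toNat - i) i
        (PySem.Chars.findFrom t ['"'] (i : Int)).toNat b' fuelA
        (t.length - (PySem.Chars.findFrom t ['"'] (i : Int)).toNat) (by omega) (le_of_lt hqlt)
        hcond h1 (by omega)]
      rw [pvA_step_quote t f rp _ hqlt hquote b' hf _
        (t.length - ((PySem.Chars.findFrom t ['"'] (i : Int)).toNat + 1)) (by omega) (by omega)]
      rw [ih ((PySem.Chars.findFrom t ['"'] (i : Int)).toNat + 1) (!b') _ mB (by omega) (by omega) (by omega)]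
      have hcast1 : PySem.Chars.findFrom t ['"'] (i : Int) + 1
          = (((PySem.Chars.findFrom t ['"'] (i : Int)).toNat + 1 : Nat) : Int) := by omega
      rw [hcast1, PySem.List.slice_natCast, pvTakeSplit t i _ hiq hqlt, hquote]
      simp
    cases b with
    | true =>
      simp only [pvLoopB, if_pos hi, if_pos trivial]
      by_cases hq : PySem.Chars.findFrom t ['"'] (i : Int) = -1
      · rw [if_pos hq]
        apply tail true
        intro k hk1 hk2
        refine ⟨fun hce => pvNoOccAll t ['"'] i hil hq k hk1 ((pvSingletonPrefix t k '"').mpr hce), by simp⟩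
      · rw [if_neg hq, pvLoopB_acc]
        rw [quote true hq ?_]
        · simp
        · intro k hk1 hk2
          obtain ⟨hiq, hqlt, hqcast, hqpre, hqmin⟩ := pvFindFacts t ['"'] (by simp) i hil hq
          refine ⟨fun hce => hqmin k hk1 hk2 ((pvSingletonPrefix t k '"').mpr hce), by simp⟩
    | false =>
      simp only [pvLoopB, if_pos hi, Bool.false_eq_true, if_false]
      by_cases hc1 : PySem.Chars.findFrom t f (i : Int) ≠ -1 ∧
          (PySem.Chars.findFrom t ['"'] (i : Int) = -1 ∨
           PySem.Chars.findFrom t f (i : Int) < PySem.Chars.findFrom t ['"'] (i : Int))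
      · rw [if_pos hc1, pvLoopB_acc]
        obtain ⟨hif, hflt, hfcast, hfpre, hfmin⟩ := pvFindFacts t f hf i hil hc1.1
        have hnoq : ∀ k, i ≤ k → k ≤ (PySem.Chars.findFrom t f (i : Int)).toNat →
            ¬ ['"'] <+: t.drop k := by
          intro k hk1 hk2
          rcases hc1.2 with hqe | hlt
          · exact pvNoOccAll t ['"'] i hil hqe k hk1
          · have hqne : PySem.Chars.findFrom t ['"'] (i : Int) ≠ -1 := by omega
            obtain ⟨hiq, hqlt, hqcast, hqpre, hqmin⟩ := pvFindFacts t ['"'] (by simp) i hil hqne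
            exact hqmin k hk1 (by omega)
        have hnq : ¬ t[(PySem.Chars.findFrom t f (i : Int)).toNat] = '"' :=
          pvNotQuote t _ hflt (hnoq _ hif (le_refl _))
        have hfend : (PySem.Chars.findFrom t f (i : Int)).toNat + f.length ≤ t.length := by
          have hle := hfpre.length_le
          rw [List.length_drop] at hle
          omega
        rw [pvA_scan t f rp hf ((PySem.Chars.findFrom t f (i : Int)).toNat - i) i
          (PySem.Chars.findFrom t f (i : Int)).toNat false fuelA
          (t.length - (PySem.Chars.findFrom t f (i : Int)).toNat) (by omega) (le_of_lt hflt)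
          (fun k hk1 hk2 => ⟨fun hce => hnoq k hk1 (by omega) ((pvSingletonPrefix t k '"').mpr hce),
            fun _ => hfmin k hk1 hk2⟩) h1 (by omega)]
        rw [pvA_step_match t f rp hf _ hflt hnq hfpre _
          (t.length - ((PySem.Chars.findFrom t f (i : Int)).toNat + f.length)) (by omega) (by omega)]
        rw [ih ((PySem.Chars.findFrom t f (i : Int)).toNat + f.length) false _ mB (by omega) (by omega) (by omega)]
        have hsl : PySem.List.slice t (some ((i : Int))) (some (PySem.Chars.findFrom t f (i : Int)))
            = (t.drop i).take ((PySem.Chars.findFrom t f (i : Int)).toNat - i) := by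
          rw [← hfcast, PySem.List.slice_natCast]
          norm_cast
        simp [hsl]
      · rw [if_neg hc1]
        by_cases hq : PySem.Chars.findFrom t ['"'] (i : Int) ≠ -1
        · rw [if_pos hq, pvLoopB_acc]
          obtain ⟨hiq, hqlt, hqcast, hqpre, hqmin⟩ := pvFindFacts t ['"'] (by simp) i hil hq
          have hnomatch : ∀ k, i ≤ k → k < (PySem.Chars.findFrom t ['"'] (i : Int)).toNat →
              ¬ f <+: t.drop k := by
            by_cases hfq : PySem.Chars.findFrom t f (i : Int) = -1
            · intro k hk1 _
              exact pvNoOccAll t f i hil hfq k hk1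
            · have hge : ¬ (PySem.Chars.findFrom t ['"'] (i : Int) = -1 ∨
                  PySem.Chars.findFrom t f (i : Int) < PySem.Chars.findFrom t ['"'] (i : Int)) :=
                fun h => hc1 ⟨hfq, h⟩
              obtain ⟨hif, hflt, hfcast, hfpre, hfmin⟩ := pvFindFacts t f hf i hil hfq
              intro k hk1 hk2
              exact hfmin k hk1 (by omega)
          rw [quote false hq (fun k hk1 hk2 =>
            ⟨fun hce => hqmin k hk1 hk2 ((pvSingletonPrefix t k '"').mpr hce),
             fun _ => hnomatch k hk1 hk2⟩)]
          simp
        · rw [if_neg hq]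
          replace hq := not_not.mp hq
          have hfq : PySem.Chars.findFrom t f (i : Int) = -1 := by
            by_contra hfne
            exact hc1 ⟨hfne, Or.inl hq⟩
          apply tail false
          intro k hk1 hk2
          exact ⟨fun hce => pvNoOccAll t ['"'] i hil hq k hk1 ((pvSingletonPrefix t k '"').mpr hce),
                 fun _ => pvNoOccAll t f i hil hfq k hk1⟩

-- ===== VERDICT (by name: the statement is the Claim_ definition above) =====
theorem replace_outside_strings_py_spec : Claim_equal_replace_outside_strings_py := by
  intro text find replace hdom hpre
  unfold Spec_replace_outside_strings_py
  unfold replace_outside_strings_py replace_outside_strings_py_alt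
  rw [pvJoin_flatten, pvJoin_flatten]
  have hf : find.toList ≠ [] := by
    intro h
    exact hpre (String.toList_eq_nil_iff.mp h)
  congr 1
  exact pvMain text.toList find.toList replace.toList hf
    (text.toList.length) 0 false _ _ (by omega) (by omega) (by omega)
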